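-- pv_equiv track=rewrite | github.com/TheBroOfCookies/Advent_of_code-2023 | Day_11/day_11.py | exchange_to_numbers
-- ===== SOURCE A (Python) =====
-- def exchange_to_numbers(grid):
--     galax_coords = []
--     for i in range(len(grid)):
--         for j in range(len(grid[0])):
--             if grid[i][j] == "#":
--                 galax_coords.append([i, j])
--                 grid[i][j] = str(len(galax_coords))
--     return grid, galax_coords
-- ===== SOURCE B (Python) =====
-- def exchange_to_numbers(grid):
--     # Phase 1: count the galaxies without labeling anything.
--     w = len(grid[0]) if grid else 0
--     n = sum(row[:w].count("#") for row in grid)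
--     # Phase 2: traverse the grid BACKWARDS, handing out labels in descending
--     # order from the precomputed total; collect coordinates backwards too and
--     # flip them once at the end.  (Mutates the argument grid in place, like A.)
--     coords_rev = []
--     for i in reversed(range(len(grid))):
--         row = grid[i]
--         for j in reversed(range(w)):
--             if row[j] == "#":
--                 row[j] = str(n)
--                 n -= 1
--                 coords_rev.append([i, j])
--     return grid, coords_rev[::-1]
-- ===== Notes on version B (the rewrite author's own statement) =====
-- stated objective: alternative
-- what changed: A numbers galaxies in one forward scan with an ascending counter that is only known as it goes; B first counts all galaxies (sum of per-row '#' counts), then traverses the grid in reverse handing out labels descending from that total and collecting coordinates back-to-front, reversing the coordinate list once at the end.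
import Mathlib
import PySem

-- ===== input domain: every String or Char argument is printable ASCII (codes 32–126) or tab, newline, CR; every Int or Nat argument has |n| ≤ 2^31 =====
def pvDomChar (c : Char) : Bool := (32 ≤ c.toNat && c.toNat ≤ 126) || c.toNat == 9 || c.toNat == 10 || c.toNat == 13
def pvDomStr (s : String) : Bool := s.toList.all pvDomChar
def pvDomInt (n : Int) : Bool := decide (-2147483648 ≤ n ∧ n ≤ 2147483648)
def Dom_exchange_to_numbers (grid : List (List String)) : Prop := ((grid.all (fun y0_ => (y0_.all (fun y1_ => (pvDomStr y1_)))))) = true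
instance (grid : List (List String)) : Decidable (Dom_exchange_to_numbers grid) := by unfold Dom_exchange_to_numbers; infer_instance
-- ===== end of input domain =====

-- B replaces A's forward scan with an ascending counter by count-first then a
-- REVERSE traversal handing out labels descending from the precomputed total
-- (objective: alternative). Equivalence is about the RETURN value; both Pythons
-- mutate the argument grid in place identically.

-- shared cell read/write helpers (Python grid[i][j] read / assignment; indices
-- are in range on Pre_, so getD/set are exact there)
def pvCell (g : List (List String)) (i j : Nat) : String := (g.getD i []).getD j ""
def pvSetCell (g : List (List String)) (i j : Nat) (v : String) : List (List String) :=
  g.set i ((g.getD i []).set j v)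

-- ===== PORT A =====
-- len(grid[0]) is re-read each inner loop, but element assignment preserves row
-- lengths, so it always equals the original first-row length used here.
def exchange_to_numbers (grid : List (List String)) : List (List String) × List (List Int) :=
  (List.range grid.length).foldl
    (fun st i =>
      (List.range (grid.headD []).length).foldl
        (fun (st : List (List String) × List (List Int)) j =>
          if pvCell st.1 i j == "#" then
            let cs := st.2 ++ [[(i : Int), (j : Int)]]
            (pvSetCell st.1 i j (PySem.Int.toStr (cs.length : Int)), cs)
          else st)
        st)
    (grid, [])

-- ===== PORT B =====
-- Source B's two phases: n = sum(row[:w].count("#")), then the reverse traversal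
-- with the descending counter; state is (grid, n, coords_rev).
def exchange_to_numbers_alt (grid : List (List String)) : List (List String) × List (List Int) :=
  let w := (grid.headD []).length
  let n0 : Int := grid.foldl
    (fun a row => a + (PySem.List.count (PySem.List.slice row none (some (w : Int))) "#" : Int)) 0
  let st :=
    ((List.range grid.length).reverse).foldl
      (fun (st : List (List String) × Int × List (List Int)) i =>
        ((List.range w).reverse).foldl
          (fun (st : List (List String) × Int × List (List Int)) j =>
            if pvCell st.1 i j == "#" then
              (pvSetCell st.1 i j (PySem.Int.toStr st.2.1), st.2.1 - 1,
               st.2.2 ++ [[(i : Int), (j : Int)]])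
            else st)
          st)
      (grid, n0, [])
  (st.1, st.2.2.reverse)

-- ===== PRECONDITION & SPEC =====
-- Pre_ excludes exactly the ragged grids on which Python A raises IndexError:
-- some row is shorter than the first row (whose length is the width used for
-- every row).  B's labeling phase raises there too.
def Pre_exchange_to_numbers (grid : List (List String)) : Prop :=
  ∀ row ∈ grid, (grid.headD []).length ≤ row.length
instance (grid : List (List String)) : Decidable (Pre_exchange_to_numbers grid) := by
  unfold Pre_exchange_to_numbers; infer_instance
def pvWitness_exchange_to_numbers : List (List String) :=
  [[".", "#"], ["#", "."]]
def Spec_exchange_to_numbers (grid : List (List String)) (out : List (List String) × List (List Int)) : Prop := out = exchange_to_numbers_alt grid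
instance (grid : List (List String)) (out : List (List String) × List (List Int)) : Decidable (Spec_exchange_to_numbers grid out) := by unfold Spec_exchange_to_numbers; infer_instance

-- ===== CLAIM (what is proved, stated in full; the proofs are below) =====
def Claim_equal_exchange_to_numbers : Prop := ∀ (grid : List (List String)), Dom_exchange_to_numbers grid → Pre_exchange_to_numbers grid → Spec_exchange_to_numbers grid (exchange_to_numbers grid)

-- ===== LEMMAS AND PROOFS =====

-- proof-side names for the loop bodies of the two ports
def pvStepA (i : Nat) (st : List (List String) × List (List Int)) (j : Nat) :
    List (List String) × List (List Int) :=
  if pvCell st.1 i j == "#" then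
    let cs := st.2 ++ [[(i : Int), (j : Int)]]
    (pvSetCell st.1 i j (PySem.Int.toStr (cs.length : Int)), cs)
  else st

def pvOuterA (grid : List (List String)) (st : List (List String) × List (List Int)) (i : Nat) :
    List (List String) × List (List Int) :=
  (List.range (grid.headD []).length).foldl (pvStepA i) st

def pvStepB (i : Nat) (st : List (List String) × Int × List (List Int)) (j : Nat) :
    List (List String) × Int × List (List Int) :=
  if pvCell st.1 i j == "#" then
    (pvSetCell st.1 i j (PySem.Int.toStr st.2.1), st.2.1 - 1, st.2.2 ++ [[(i : Int), (j : Int)]])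
  else st

def pvOuterB (w : Nat) (st : List (List String) × Int × List (List Int)) (i : Nat) :
    List (List String) × Int × List (List Int) :=
  ((List.range w).reverse).foldl (pvStepB i) st

def pvPickRow (grid : List (List String)) (w i : Nat) : List (Nat × Nat) :=
  (List.range w).filterMap (fun j => if pvCell grid i j == "#" then some (i, j) else none)

def pvToL (p : Nat × Nat) : List Int := [(p.1 : Int), (p.2 : Int)]

-- ascending labeling (A's shape): p-th processed cell gets label k+1, k+2, …
def pvLabel (g : List (List String)) : List (Nat × Nat) → Nat → List (List String)
  | [], _ => g
  | p :: ps, k => pvLabel (pvSetCell g p.1 p.2 (PySem.Int.toStr ((k : Int) + 1))) ps (k + 1)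

-- descending labeling (B's shape): cells get labels m, m-1, m-2, …
def pvLabelD (g : List (List String)) : List (Nat × Nat) → Int → List (List String)
  | [], _ => g
  | p :: ps, m => pvLabelD (pvSetCell g p.1 p.2 (PySem.Int.toStr m)) ps (m - 1)

lemma pvA_eq (grid : List (List String)) :
    exchange_to_numbers grid = (List.range grid.length).foldl (pvOuterA grid) (grid, []) := rfl

lemma pvB_eq (grid : List (List String)) :
    exchange_to_numbers_alt grid =
      (let n0 : Int := grid.foldl
          (fun a row => a + (PySem.List.count (PySem.List.slice row none (some ((grid.headD []).length : Int))) "#" : Int)) 0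
       let st := ((List.range grid.length).reverse).foldl (pvOuterB (grid.headD []).length) (grid, n0, [])
       (st.1, st.2.2.reverse)) := rfl

lemma pvCell_set_ne (g : List (List String)) (i j : Nat) (v : String) (i' j' : Nat)
    (h : i ≠ i' ∨ j ≠ j') : pvCell (pvSetCell g i j v) i' j' = pvCell g i' j' := by
  by_cases hi : i = i'
  · subst hi
    have hj : j ≠ j' := h.resolve_left (fun hc => hc rfl)
    unfold pvCell pvSetCell
    by_cases hl : i < g.length
    · rw [List.getD, List.getD, List.getElem?_set_self hl]
      simp [List.getElem?_set_ne hj, List.getD]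
    · rw [List.set_eq_of_length_le (by omega)]
  · unfold pvCell pvSetCell
    rw [List.getD, List.getD, List.getElem?_set_ne hi]
    rfl

lemma pvSetCell_comm (g : List (List String)) (i j : Nat) (v : String) (i' j' : Nat) (v' : String)
    (h : i ≠ i' ∨ j ≠ j') :
    pvSetCell (pvSetCell g i j v) i' j' v' = pvSetCell (pvSetCell g i' j' v') i j v := by
  by_cases hi : i = i'
  · subst hi
    have hj : j ≠ j' := h.resolve_left (fun hc => hc rfl)
    by_cases hl : i < g.length
    · unfold pvSetCell
      have hX : ∀ X : List String, (g.set i X).getD i [] = X := fun X => by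
        rw [List.getD, List.getElem?_set_self hl]; rfl
      rw [hX, hX, List.set_set, List.set_set, List.set_comm _ _ hj]
    · unfold pvSetCell
      have hg : ∀ X : List String, g.set i X = g := fun X =>
        List.set_eq_of_length_le (by omega)
      simp only [hg]
  · unfold pvSetCell
    have h1 : ∀ X : List String, (g.set i X).getD i' [] = g.getD i' [] := fun X => by
      rw [List.getD, List.getElem?_set_ne hi, List.getD]
    have h2 : ∀ Y : List String, (g.set i' Y).getD i [] = g.getD i [] := fun Y => by
      rw [List.getD, List.getElem?_set_ne (Ne.symm hi), List.getD]
    rw [h1, h2, List.set_comm _ _ hi]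

lemma pvLabel_cell (ps : List (Nat × Nat)) (g : List (List String)) (k i j : Nat)
    (h : ∀ p ∈ ps, p.1 ≠ i) : pvCell (pvLabel g ps k) i j = pvCell g i j := by
  induction ps generalizing g k with
  | nil => rfl
  | cons p ps IH =>
    rw [pvLabel, IH _ _ (fun q hq => h q (List.mem_cons_of_mem _ hq))]
    exact pvCell_set_ne _ _ _ _ _ _ (Or.inl (h p (List.mem_cons_self)))

lemma pvLabelD_cell (ps : List (Nat × Nat)) (g : List (List String)) (m : Int) (i j : Nat)
    (h : ∀ p ∈ ps, p.1 ≠ i) : pvCell (pvLabelD g ps m) i j = pvCell g i j := by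
  induction ps generalizing g m with
  | nil => rfl
  | cons p ps IH =>
    rw [pvLabelD, IH _ _ (fun q hq => h q (List.mem_cons_of_mem _ hq))]
    exact pvCell_set_ne _ _ _ _ _ _ (Or.inl (h p (List.mem_cons_self)))

lemma pvLabel_append (ps qs : List (Nat × Nat)) (g : List (List String)) (k : Nat) :
    pvLabel g (ps ++ qs) k = pvLabel (pvLabel g ps k) qs (k + ps.length) := by
  induction ps generalizing g k with
  | nil => simp [pvLabel]
  | cons p ps IH =>
    rw [List.cons_append, pvLabel, pvLabel, IH]
    congr 1
    simp
    omega

lemma pvLabel_set_comm (ps : List (Nat × Nat)) (p : Nat × Nat) (hp : p ∉ ps)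
    (g : List (List String)) (v : String) (k : Nat) :
    pvLabel (pvSetCell g p.1 p.2 v) ps k = pvSetCell (pvLabel g ps k) p.1 p.2 v := by
  induction ps generalizing g k with
  | nil => rfl
  | cons q qs IH =>
    have hne : q ≠ p := fun he => hp (he ▸ List.mem_cons_self)
    have hcell : q.1 ≠ p.1 ∨ q.2 ≠ p.2 := by
      rcases eq_or_ne q.1 p.1 with h1 | h1
      · exact Or.inr (fun h2 => hne (Prod.ext h1 h2))
      · exact Or.inl h1
    rw [pvLabel, pvLabel, pvSetCell_comm _ _ _ _ _ _ _
      (hcell.imp (fun h => Ne.symm h) (fun h => Ne.symm h)),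
      IH (fun hm => hp (List.mem_cons_of_mem _ hm))]

-- B's descending labels over the reversed coordinate list = A's ascending labels
lemma pvLabelD_reverse (ps : List (Nat × Nat)) (hnd : ps.Nodup) (g : List (List String)) (k : Nat) :
    pvLabelD g ps.reverse ((k : Int) + ps.length) = pvLabel g ps k := by
  induction ps using List.reverseRecOn generalizing g with
  | nil => rfl
  | append_singleton ps p IH =>
    have hnd' : ps.Nodup := (List.nodup_append.mp hnd).1
    have hp : p ∉ ps := by
      intro hm
      have hd := (List.nodup_append.mp hnd).2.2
      exact hd p hm p (List.mem_singleton.mpr rfl) rfl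
    rw [List.reverse_append, List.reverse_singleton, List.singleton_append, pvLabelD]
    have harith : ((k : Int) + (ps ++ [p]).length) - 1 = (k : Int) + ps.length := by
      simp; omega
    have harith2 : ((k : Int) + (ps ++ [p]).length) = (k : Int) + ps.length + 1 := by
      simp; omega
    rw [harith, harith2, IH hnd',
      pvLabel_set_comm ps p hp, pvLabel_append, pvLabel, pvLabel]
    have hcast : ((k : Int) + ps.length + 1) = (((k + ps.length : Nat) : Int) + 1) := by
      push_cast; ring
    rw [hcast]

lemma pvPickRow_fst (grid : List (List String)) (w i : Nat) :
    ∀ p ∈ pvPickRow grid w i, p.1 = i := by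
  intro p hp
  simp only [pvPickRow, List.mem_filterMap] at hp
  obtain ⟨j, -, hj⟩ := hp
  split at hj
  · cases hj; rfl
  · cases hj

lemma pvPickRow_nodup (grid : List (List String)) (w i : Nat) : (pvPickRow grid w i).Nodup := by
  apply List.Nodup.filterMap _ List.nodup_range
  intro a b c hca hcb
  split at hca <;> cases hca
  split at hcb <;> cases hcb
  rfl

lemma pvCoords_nodup (grid : List (List String)) (w : Nat) :
    ((List.range grid.length).flatMap (pvPickRow grid w)).Nodup := by
  rw [List.nodup_flatMap]
  refine ⟨fun i _ => pvPickRow_nodup grid w i, ?_⟩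
  have : List.Pairwise (· ≠ ·) (List.range grid.length) := List.nodup_range
  refine this.imp ?_
  intro a b hab p hpa hpb
  exact hab ((pvPickRow_fst grid w a p hpa).symm.trans (pvPickRow_fst grid w b p hpb))

-- ===== A-side characterization =====

lemma pvInner_spec (grid : List (List String)) (i : Nat) :
    ∀ (js : List Nat) (g : List (List String)) (cs : List (List Int)), js.Nodup →
      (∀ j ∈ js, pvCell g i j = pvCell grid i j) →
      js.foldl (pvStepA i) (g, cs) =
        (pvLabel g (js.filterMap (fun j => if pvCell grid i j == "#" then some (i, j) else none)) cs.length,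
         cs ++ (js.filterMap (fun j => if pvCell grid i j == "#" then some (i, j) else none)).map pvToL) := by
  intro js
  induction js with
  | nil => intro g cs _ _; simp [pvLabel]
  | cons j js IH =>
    intro g cs nd hag
    have hjmem : pvCell g i j = pvCell grid i j := hag j (List.mem_cons_self)
    have hnotin : j ∉ js := (List.nodup_cons.mp nd).1
    rw [List.foldl_cons]
    by_cases hc : pvCell grid i j == "#"
    · have hce : pvCell grid i j = "#" := by simpa using hc
      have harg : (((cs ++ [[(i : Int), (j : Int)]]).length : Nat) : Int) = (cs.length : Int) + 1 := by
        simp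
      have hstep : pvStepA i (g, cs) j =
          (pvSetCell g i j (PySem.Int.toStr ((cs.length : Int) + 1)), cs ++ [[(i : Int), (j : Int)]]) := by
        simp only [pvStepA, hjmem, hc, if_true, harg]
      have hpick : (j :: js).filterMap (fun j => if pvCell grid i j == "#" then some (i, j) else none)
          = (i, j) :: js.filterMap (fun j => if pvCell grid i j == "#" then some (i, j) else none) := by
        simp [hce]
      rw [hstep,
        IH _ _ (List.nodup_cons.mp nd).2
          (fun j' hj' => by
            rw [pvCell_set_ne _ _ _ _ _ _ (Or.inr (fun he => hnotin (by rw [he]; exact hj')))]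
            exact hag j' (List.mem_cons_of_mem _ hj')),
        hpick]
      simp only [pvLabel, pvToL, List.map_cons]
      rw [List.append_cons]
      simp
    · have hce : ¬ pvCell grid i j = "#" := by simpa using hc
      have hstep : pvStepA i (g, cs) j = (g, cs) := by
        simp [pvStepA, hjmem, hc]
      have hpick : (j :: js).filterMap (fun j => if pvCell grid i j == "#" then some (i, j) else none)
          = js.filterMap (fun j => if pvCell grid i j == "#" then some (i, j) else none) := by
        simp [hce]
      rw [hstep, hpick]
      exact IH _ _ (List.nodup_cons.mp nd).2
        (fun j' hj' => hag j' (List.mem_cons_of_mem _ hj'))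

lemma pvOuter_spec (grid : List (List String)) :
    ∀ (is_ : List Nat) (g : List (List String)) (cs : List (List Int)), is_.Nodup →
      (∀ i ∈ is_, ∀ j, pvCell g i j = pvCell grid i j) →
      is_.foldl (pvOuterA grid) (g, cs) =
        (pvLabel g (is_.flatMap (pvPickRow grid (grid.headD []).length)) cs.length,
         cs ++ (is_.flatMap (pvPickRow grid (grid.headD []).length)).map pvToL) := by
  intro is_
  induction is_ with
  | nil => intro g cs _ _; simp [pvLabel]
  | cons i is_ IH =>
    intro g cs nd hag
    have hnotin : i ∉ is_ := (List.nodup_cons.mp nd).1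
    rw [List.foldl_cons]
    have hinner : pvOuterA grid (g, cs) i =
        (pvLabel g (pvPickRow grid (grid.headD []).length i) cs.length,
         cs ++ (pvPickRow grid (grid.headD []).length i).map pvToL) := by
      rw [pvOuterA,
        pvInner_spec grid i (List.range (grid.headD []).length) g cs List.nodup_range
          (fun j _ => hag i (List.mem_cons_self) j)]
      rfl
    rw [hinner,
      IH _ _ (List.nodup_cons.mp nd).2
        (fun i' hi' j => by
          rw [pvLabel_cell _ _ _ _ _
            (fun p hp => by
              rw [pvPickRow_fst grid _ i p hp]
              exact fun he => hnotin (by rw [he]; exact hi'))]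
          exact hag i' (List.mem_cons_of_mem _ hi') j)]
    rw [List.flatMap_cons, pvLabel_append]
    simp

-- ===== B-side characterization =====

lemma pvInnerB_spec (grid : List (List String)) (i : Nat) :
    ∀ (js : List Nat) (g : List (List String)) (m : Int) (cs : List (List Int)), js.Nodup →
      (∀ j ∈ js, pvCell g i j = pvCell grid i j) →
      js.foldl (pvStepB i) (g, m, cs) =
        (pvLabelD g (js.filterMap (fun j => if pvCell grid i j == "#" then some (i, j) else none)) m,
         m - (js.filterMap (fun j => if pvCell grid i j == "#" then some (i, j) else none)).length,
         cs ++ (js.filterMap (fun j => if pvCell grid i j == "#" then some (i, j) else none)).map pvToL) := by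
  intro js
  induction js with
  | nil => intro g m cs _ _; simp [pvLabelD]
  | cons j js IH =>
    intro g m cs nd hag
    have hjmem : pvCell g i j = pvCell grid i j := hag j (List.mem_cons_self)
    have hnotin : j ∉ js := (List.nodup_cons.mp nd).1
    rw [List.foldl_cons]
    by_cases hc : pvCell grid i j == "#"
    · have hce : pvCell grid i j = "#" := by simpa using hc
      have hstep : pvStepB i (g, m, cs) j =
          (pvSetCell g i j (PySem.Int.toStr m), m - 1, cs ++ [[(i : Int), (j : Int)]]) := by
        simp only [pvStepB, hjmem, hc, if_true]
      have hpick : (j :: js).filterMap (fun j => if pvCell grid i j == "#" then some (i, j) else none)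
          = (i, j) :: js.filterMap (fun j => if pvCell grid i j == "#" then some (i, j) else none) := by
        simp [hce]
      rw [hstep,
        IH _ _ _ (List.nodup_cons.mp nd).2
          (fun j' hj' => by
            rw [pvCell_set_ne _ _ _ _ _ _ (Or.inr (fun he => hnotin (by rw [he]; exact hj')))]
            exact hag j' (List.mem_cons_of_mem _ hj')),
        hpick]
      simp only [pvLabelD, pvToL, List.map_cons, List.length_cons]
      rw [Prod.mk.injEq, Prod.mk.injEq]
      refine ⟨rfl, by push_cast; ring, by simp⟩
    · have hce : ¬ pvCell grid i j = "#" := by simpa using hc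
      have hstep : pvStepB i (g, m, cs) j = (g, m, cs) := by
        simp [pvStepB, hjmem, hc]
      have hpick : (j :: js).filterMap (fun j => if pvCell grid i j == "#" then some (i, j) else none)
          = js.filterMap (fun j => if pvCell grid i j == "#" then some (i, j) else none) := by
        simp [hce]
      rw [hstep, hpick]
      exact IH _ _ _ (List.nodup_cons.mp nd).2
        (fun j' hj' => hag j' (List.mem_cons_of_mem _ hj'))

lemma pvLabelD_append (ps qs : List (Nat × Nat)) (g : List (List String)) (m : Int) :
    pvLabelD g (ps ++ qs) m = pvLabelD (pvLabelD g ps m) qs (m - ps.length) := by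
  induction ps generalizing g m with
  | nil => simp [pvLabelD]
  | cons p ps IH =>
    rw [List.cons_append, pvLabelD, pvLabelD, IH]
    congr 1
    simp
    ring

lemma pvOuterB_spec (grid : List (List String)) (w : Nat) :
    ∀ (is_ : List Nat) (g : List (List String)) (m : Int) (cs : List (List Int)), is_.Nodup →
      (∀ i ∈ is_, ∀ j, pvCell g i j = pvCell grid i j) →
      is_.foldl (pvOuterB w) (g, m, cs) =
        (pvLabelD g (is_.flatMap (fun i => (pvPickRow grid w i).reverse)) m,
         m - (is_.flatMap (fun i => (pvPickRow grid w i).reverse)).length,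
         cs ++ (is_.flatMap (fun i => (pvPickRow grid w i).reverse)).map pvToL) := by
  intro is_
  induction is_ with
  | nil => intro g m cs _ _; simp [pvLabelD]
  | cons i is_ IH =>
    intro g m cs nd hag
    have hnotin : i ∉ is_ := (List.nodup_cons.mp nd).1
    rw [List.foldl_cons]
    have hrev : ((List.range w).reverse).filterMap
        (fun j => if pvCell grid i j == "#" then some (i, j) else none)
        = (pvPickRow grid w i).reverse := by
      rw [List.filterMap_reverse]; rfl
    have hinner : pvOuterB w (g, m, cs) i =
        (pvLabelD g ((pvPickRow grid w i).reverse) m,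
         m - ((pvPickRow grid w i).reverse).length,
         cs ++ ((pvPickRow grid w i).reverse).map pvToL) := by
      rw [pvOuterB,
        pvInnerB_spec grid i ((List.range w).reverse) g m cs
          (List.nodup_reverse.mpr List.nodup_range)
          (fun j _ => hag i (List.mem_cons_self) j),
        hrev]
    rw [hinner,
      IH _ _ _ (List.nodup_cons.mp nd).2
        (fun i' hi' j => by
          rw [pvLabelD_cell _ _ _ _ _
            (fun p hp => by
              rw [pvPickRow_fst grid _ i p (List.mem_reverse.mp hp)]
              exact fun he => hnotin (by rw [he]; exact hi'))]
          exact hag i' (List.mem_cons_of_mem _ hi') j)]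
    rw [List.flatMap_cons, pvLabelD_append]
    rw [Prod.mk.injEq, Prod.mk.injEq]
    refine ⟨rfl, by simp; ring, by simp⟩

-- reversed outer list with reversed rows = the reverse of A's coordinate list
lemma pvRevCoords (grid : List (List String)) (w : Nat) :
    ((List.range grid.length).reverse).flatMap (fun i => (pvPickRow grid w i).reverse)
      = ((List.range grid.length).flatMap (pvPickRow grid w)).reverse := by
  rw [List.reverse_flatMap]
  rfl

-- ===== the count phase equals the number of collected coordinates =====

lemma pvRowCount (row : List String) (f : Nat → String) (hf : ∀ j, f j = row.getD j "") :
    ∀ w : Nat, (List.range w).countP (fun j => f j == "#") = (row.take w).count "#" := by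
  intro w
  induction w with
  | zero => simp
  | succ w IH =>
    rw [List.range_succ, List.countP_append, List.take_add_one, List.count_append, IH]
    congr 1
    by_cases hw : w < row.length
    · rw [List.getElem?_eq_getElem hw]
      simp only [List.countP_cons, List.countP_nil, Option.toList_some, List.count_singleton]
      rw [hf w, List.getD, List.getElem?_eq_getElem hw]
      simp [beq_iff_eq]
    · rw [List.getElem?_eq_none (by omega)]
      simp only [List.countP_cons, List.countP_nil, Option.toList_none, List.count_nil]
      rw [hf w, List.getD, List.getElem?_eq_none (by omega)]
      simp

lemma pvPickRow_length (grid : List (List String)) (w i : Nat) :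
    (pvPickRow grid w i).length = ((grid.getD i []).take w).count "#" := by
  rw [pvPickRow, List.length_filterMap_eq_countP]
  have : ∀ j, (Option.isSome (if pvCell grid i j == "#" then some (i, j) else none))
      = (pvCell grid i j == "#") := by
    intro j; split <;> simp_all
  rw [List.countP_congr (fun j _ => by rw [this])]
  exact pvRowCount (grid.getD i []) (fun j => pvCell grid i j) (fun j => rfl) w

lemma pvMapRangeGetD {β : Type} (f : List String → β) :
    ∀ (g : List (List String)),
      (List.range g.length).map (fun i => f (g.getD i [])) = g.map f := by
  intro g
  induction g with
  | nil => rfl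
  | cons r rs IH =>
    rw [List.length_cons, List.range_succ_eq_map, List.map_cons, List.map_map, List.map_cons]
    congr 1

lemma pvFoldlCount (w : Nat) :
    ∀ (g : List (List String)) (a : Int),
      g.foldl (fun a row => a + (PySem.List.count (PySem.List.slice row none (some (w : Int))) "#" : Int)) a
        = a + ((g.map (fun row => (row.take w).count "#")).sum : Int) := by
  intro g
  induction g with
  | nil => intro a; simp
  | cons r rs IH =>
    intro a
    rw [List.foldl_cons, IH, List.map_cons, List.sum_cons,
      PySem.List.slice_to_natCast, PySem.List.count_eq]
    ring

lemma pvCountTotal (grid : List (List String)) :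
    grid.foldl
      (fun a row => a + (PySem.List.count (PySem.List.slice row none (some ((grid.headD []).length : Int))) "#" : Int)) 0
      = (((List.range grid.length).flatMap (pvPickRow grid (grid.headD []).length)).length : Int) := by
  rw [pvFoldlCount, List.length_flatMap]
  have h1 : (List.range grid.length).map (fun i => (pvPickRow grid (grid.headD []).length i).length)
      = (List.range grid.length).map (fun i => ((grid.getD i []).take (grid.headD []).length).count "#") :=
    List.map_congr_left (fun i _ => pvPickRow_length grid _ i)
  rw [h1, pvMapRangeGetD (fun row => (row.take (grid.headD []).length).count "#")]
  simp [Function.comp_def]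

-- ===== VERDICT (by name: the statement is the Claim_ definition above) =====
theorem exchange_to_numbers_spec : Claim_equal_exchange_to_numbers := by
  intro grid _ _
  unfold Spec_exchange_to_numbers
  rw [pvA_eq, pvB_eq,
    pvOuter_spec grid (List.range grid.length) grid [] List.nodup_range (fun _ _ _ => rfl)]
  simp only []
  rw [pvOuterB_spec grid (grid.headD []).length ((List.range grid.length).reverse) grid _ []
      (List.nodup_reverse.mpr List.nodup_range) (fun _ _ _ => rfl)]
  rw [pvRevCoords, pvCountTotal]
  set coords := (List.range grid.length).flatMap (pvPickRow grid (grid.headD []).length) with hc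
  have hlab : pvLabelD grid coords.reverse ((0 : Nat) + (coords.length : Int)) = pvLabel grid coords 0 :=
    pvLabelD_reverse coords (pvCoords_nodup grid _) grid 0
  rw [Nat.cast_zero, zero_add] at hlab
  refine Prod.ext hlab.symm ?_
  simp
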